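-- pv_equiv track=rewrite | github.com/VictorHLara/Hill-Climbing | hill_climbing_max.py | hill_climbing_max
-- ===== SOURCE A (Python) =====
-- def hill_climbing_max(values, start_pos):
--     """Algoritmo de subida de encosta no espaço discreto 2D."""
--     current_pos = start_pos
--     path = [current_pos]
--     while True:
--         left = current_pos - 1 if current_pos > 0 else None
--         right = current_pos + 1 if current_pos < len(values) - 1 else None
--         neighbors = [(left, values[left]) if left is not None else None,
--                      (right, values[right]) if right is not None else None]
--
--         # Filtra vizinhos válidos
--         neighbors = [n for n in neighbors if n is not None]
--
--         # Encontra o melhor vizinho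
--         best_neighbor = max(neighbors, key=lambda n: n[1], default=None)
--
--         # Verifica se há melhoria
--         if best_neighbor is None or best_neighbor[1] <= values[current_pos]:
--             break
--
--         # Atualiza a posição atual
--         current_pos = best_neighbor[0]
--         path.append(current_pos)
--
--     return path
-- ===== SOURCE B (Python) =====
-- def hill_climbing_max(values, start_pos):
--     """Algoritmo de subida de encosta no espaço discreto 2D."""
--     n = len(values)
--     cur = start_pos
--     has_left = cur > 0
--     has_right = cur < n - 1
--     if not has_left and not has_right:
--         return [cur]
--     cur_val = values[cur]
--     # pick the step direction once; left is tested first so ties prefer left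
--     step = 0
--     best = cur_val
--     if has_left and values[cur - 1] > best:
--         step, best = -1, values[cur - 1]
--     if has_right and values[cur + 1] > best:
--         step, best = 1, values[cur + 1]
--     if step == 0:
--         return [cur]
--     # single linear walk in the fixed direction
--     path = [cur]
--     while True:
--         cur += step
--         path.append(cur)
--         ok = cur > 0 if step == -1 else cur < n - 1
--         if not (ok and values[cur + step] > values[cur]):
--             return path
-- ===== Notes on version B (the rewrite author's own statement) =====
-- stated objective: alternative
-- what changed: A recomputes both neighbors and takes a keyed max on every iteration; B decides the step direction once up front (left tested before right so ties prefer left) and then does a single fixed-direction walk that only compares the next value with the current one.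
import Mathlib
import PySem

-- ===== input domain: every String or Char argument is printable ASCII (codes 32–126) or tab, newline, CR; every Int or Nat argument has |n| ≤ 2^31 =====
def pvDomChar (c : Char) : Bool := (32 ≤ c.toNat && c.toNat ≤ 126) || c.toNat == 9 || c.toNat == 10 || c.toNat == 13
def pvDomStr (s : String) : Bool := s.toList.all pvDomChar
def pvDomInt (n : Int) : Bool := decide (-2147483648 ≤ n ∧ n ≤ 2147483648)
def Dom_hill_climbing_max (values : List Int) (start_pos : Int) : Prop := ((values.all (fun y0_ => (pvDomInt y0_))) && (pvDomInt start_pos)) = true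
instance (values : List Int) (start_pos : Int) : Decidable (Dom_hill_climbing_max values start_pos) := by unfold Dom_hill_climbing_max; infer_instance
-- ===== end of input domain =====

-- B replaces A's per-step two-neighbor max with a direction chosen once up front followed by a
-- single one-sided walk (objective: simpler per-step work, same O(path) cost).

-- values[i] (Python negative indices wrap); under Pre_ every index either program reads is in
-- range, so pyGet? is some there and the .getD default is never used.
def pyVal (values : List Int) (i : Int) : Int := (PySem.List.pyGet? values i).getD 0

-- ===== PORT A =====
-- A's `while True` loop; fuel values.length + 1 bounds the iterations: each move strictly
-- increases the value at the (distinct) visited indices, so A iterates at most length+1 times.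
def hcLoopA (values : List Int) (fuel : Nat) (cur : Int) (path : List Int) : List Int :=
  match fuel with
  | 0 => path
  | fuel + 1 =>
    let left : Option Int := if 0 < cur then some (cur - 1) else none
    let right : Option Int := if cur < (values.length : Int) - 1 then some (cur + 1) else none
    let neighbors : List (Int × Int) :=
      (match left with | some l => [(l, pyVal values l)] | none => []) ++
      (match right with | some r => [(r, pyVal values r)] | none => [])
    match PySem.List.max? neighbors (fun n => n.2) with   -- max(neighbors, key=..., default=None)
    | none => path
    | some best =>
      if best.2 ≤ pyVal values cur then path
      else hcLoopA values fuel best.1 (path ++ [best.1])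

def hill_climbing_max (values : List Int) (start_pos : Int) : List Int :=
  hcLoopA values (values.length + 1) start_pos [start_pos]

-- ===== PORT B =====
-- B's single fixed-direction walk (same fuel bound as A's loop).
def hcWalkB (values : List Int) (step : Int) (fuel : Nat) (cur : Int) (path : List Int) : List Int :=
  match fuel with
  | 0 => path
  | fuel + 1 =>
    let cur' := cur + step
    let path' := path ++ [cur']
    let ok := if step = -1 then 0 < cur' else cur' < (values.length : Int) - 1
    if ok ∧ pyVal values (cur' + step) > pyVal values cur' then
      hcWalkB values step fuel cur' path'
    else path'

def hill_climbing_max_alt (values : List Int) (start_pos : Int) : List Int :=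
  let n : Int := values.length
  let hasL := 0 < start_pos
  let hasR := start_pos < n - 1
  if ¬hasL ∧ ¬hasR then [start_pos]
  else
    let curVal := pyVal values start_pos
    let sb1 : Int × Int :=
      if hasL ∧ pyVal values (start_pos - 1) > curVal then (-1, pyVal values (start_pos - 1))
      else (0, curVal)
    let sb2 : Int × Int :=
      if hasR ∧ pyVal values (start_pos + 1) > sb1.2 then (1, pyVal values (start_pos + 1))
      else sb1
    if sb2.1 = 0 then [start_pos]
    else hcWalkB values sb2.1 (values.length + 1) start_pos [start_pos]

-- ===== PRECONDITION & SPEC =====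
-- Exactly the inputs on which Python A returns: a start index in range -len..len-1 (A indexes
-- values[start_pos] and neighbors, IndexError otherwise), plus the empty list with start_pos 0 or
-- -1, where A never indexes and returns [start_pos].
def Pre_hill_climbing_max (values : List Int) (start_pos : Int) : Prop :=
  if values = [] then start_pos = 0 ∨ start_pos = -1
  else -(values.length : Int) ≤ start_pos ∧ start_pos < (values.length : Int)
instance (values : List Int) (start_pos : Int) : Decidable (Pre_hill_climbing_max values start_pos) := by unfold Pre_hill_climbing_max; infer_instance
def pvWitness_hill_climbing_max : List Int × Int := ([1, 3, 2], 0)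

def Spec_hill_climbing_max (values : List Int) (start_pos : Int) (out : List Int) : Prop := out = hill_climbing_max_alt values start_pos
instance (values : List Int) (start_pos : Int) (out : List Int) : Decidable (Spec_hill_climbing_max values start_pos out) := by unfold Spec_hill_climbing_max; infer_instance

-- ===== CLAIM (what is proved, stated in full; the proofs are below) =====
def Claim_equal_hill_climbing_max : Prop := ∀ (values : List Int) (start_pos : Int), Dom_hill_climbing_max values start_pos → Pre_hill_climbing_max values start_pos → Spec_hill_climbing_max values start_pos (hill_climbing_max values start_pos)

-- ===== LEMMAS AND PROOFS =====

-- One iteration of A's loop, characterized, given the invariant that the position we came from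
-- (cur - s) carries a strictly smaller value: A either steps by s again or stops.
theorem hcLoopA_char (values : List Int) (s : Int) (hs : s = 1 ∨ s = -1)
    (fuel : Nat) (cur : Int) (path : List Int)
    (hinv : pyVal values (cur - s) < pyVal values cur) :
    hcLoopA values (fuel + 1) cur path =
      if (if s = -1 then 0 < cur else cur < (values.length : Int) - 1) ∧
          pyVal values (cur + s) > pyVal values cur
      then hcLoopA values fuel (cur + s) (path ++ [cur + s])
      else path := by
  rcases hs with hs | hs <;> subst hs
  · simp only [hcLoopA, PySem.List.max?]
    by_cases hL : (0:Int) < cur <;>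
      by_cases hR : cur < (values.length : Int) - 1 <;>
        simp [hL, hR] <;> (try split_ifs) <;> (try dsimp only) <;> (try split_ifs) <;>
          first | rfl | linarith | (intro h; linarith)
  · rw [sub_neg_eq_add] at hinv
    simp only [hcLoopA, PySem.List.max?]
    by_cases hL : (0:Int) < cur <;>
      by_cases hR : cur < (values.length : Int) - 1 <;>
        simp [hL, hR] <;> (try split_ifs) <;> (try dsimp only) <;> (try split_ifs) <;>
          (try simp only [show cur + (-1:Int) = cur - 1 from by ring] at *) <;>
          first | rfl | linarith | (intro h; linarith)

-- A's loop, just after having stepped to cur + s, equals B's walk from cur.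
theorem walk_eq (values : List Int) (s : Int) (hs : s = 1 ∨ s = -1) :
    ∀ (fuel : Nat) (cur : Int) (path : List Int),
      pyVal values cur < pyVal values (cur + s) →
      hcLoopA values fuel (cur + s) (path ++ [cur + s]) =
        hcWalkB values s (fuel + 1) cur path := by
  intro fuel
  induction fuel with
  | zero =>
    intro cur path h
    simp only [hcLoopA, hcWalkB]
    split_ifs <;> rfl
  | succ f ih =>
    intro cur path h
    conv_rhs => rw [hcWalkB]
    rw [hcLoopA_char values s hs f (cur + s) (path ++ [cur + s])
      (by rw [add_sub_cancel_right]; exact h)]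
    by_cases hC : ((if s = -1 then 0 < cur + s else cur + s < (values.length : Int) - 1) ∧
        pyVal values (cur + s + s) > pyVal values (cur + s))
    · rw [if_pos hC, if_pos hC]
      exact ih (cur + s) (path ++ [cur + s]) hC.2
    · rw [if_neg hC, if_neg hC]

theorem top_eq (values : List Int) (start_pos : Int) :
    hill_climbing_max values start_pos = hill_climbing_max_alt values start_pos := by
  unfold hill_climbing_max hill_climbing_max_alt
  by_cases hL : (0:Int) < start_pos <;> by_cases hR : start_pos < (values.length : Int) - 1 <;>
    simp only [hcLoopA, PySem.List.max?] <;> simp [hL, hR]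
  · by_cases h1 : pyVal values start_pos < pyVal values (start_pos - 1) <;>
      by_cases hlr : pyVal values (start_pos - 1) < pyVal values (start_pos + 1) <;>
        by_cases h3 : pyVal values start_pos < pyVal values (start_pos + 1) <;>
          simp [h1, hlr, h3] <;>
          first
            | rfl
            | (exfalso; linarith)
            | (rw [if_neg (show ¬ pyVal values (start_pos + 1) ≤ pyVal values start_pos from by linarith)]
               simpa using walk_eq values 1 (Or.inl rfl) values.length start_pos [start_pos] (by linarith))
            | (rw [if_neg (show ¬ pyVal values (start_pos - 1) ≤ pyVal values start_pos from by linarith)]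
               simpa [show start_pos + (-1:Int) = start_pos - 1 from by ring] using
                 walk_eq values (-1) (Or.inr rfl) values.length start_pos [start_pos]
                   (by rw [show start_pos + (-1:Int) = start_pos - 1 from by ring]; linarith))
  · by_cases h1 : pyVal values start_pos < pyVal values (start_pos - 1)
    · simp [h1]
      rw [if_neg (show ¬ pyVal values (start_pos - 1) ≤ pyVal values start_pos from by linarith)]
      simpa [show start_pos + (-1:Int) = start_pos - 1 from by ring] using
        walk_eq values (-1) (Or.inr rfl) values.length start_pos [start_pos]
          (by rw [show start_pos + (-1:Int) = start_pos - 1 from by ring]; linarith)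
    · simp [h1]
  · by_cases h3 : pyVal values start_pos < pyVal values (start_pos + 1)
    · simp [h3]
      rw [if_neg (show ¬ pyVal values (start_pos + 1) ≤ pyVal values start_pos from by linarith)]
      simpa using walk_eq values 1 (Or.inl rfl) values.length start_pos [start_pos] (by linarith)
    · simp [h3]


-- ===== VERDICT (by name: the statement is the Claim_ definition above) =====
theorem hill_climbing_max_spec : Claim_equal_hill_climbing_max := by
  intro values start_pos _ _
  exact top_eq values start_pos
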